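-- pv_equiv track=rewrite | github.com/alvin-the-programmer/foobar-2 | lovely-lucky-lambs/solution.py | max_henchmen_when_stingy
-- ===== SOURCE A (Python) =====
-- def max_henchmen_when_stingy(total_lambs):
--     curr_cost = 1
--     henchmen = []
--     while total_lambs >= curr_cost:
--         total_lambs -= curr_cost
--         henchmen.append(curr_cost)
--         if len(henchmen) != 1:
--             curr_cost = henchmen[-1] + henchmen[-2]
--     return len(henchmen)
-- ===== SOURCE B (Python) =====
-- def max_henchmen_when_stingy(total_lambs):
--     # sum(F(1..n)) = F(n+2) - 1, so n lambs-costs fit iff F(n+2) <= total_lambs + 1: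
--     # compare each Fibonacci value against a fixed budget instead of subtracting from a remainder.
--     budget = total_lambs + 1
--     f1, f2 = 1, 2
--     count = 0
--     while f2 <= budget:
--         count += 1
--         f1, f2 = f2, f1 + f2
--     return count
-- ===== Notes on version B (the rewrite author's own statement) =====
-- stated objective: simpler
-- what changed: B drops A's growing list of past costs and running remaining-budget subtraction: it keeps two scalar Fibonacci variables and a counter, comparing each Fibonacci value against the fixed bound total_lambs+1 (using sum F(1..n) = F(n+2)-1).
import Mathlib
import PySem

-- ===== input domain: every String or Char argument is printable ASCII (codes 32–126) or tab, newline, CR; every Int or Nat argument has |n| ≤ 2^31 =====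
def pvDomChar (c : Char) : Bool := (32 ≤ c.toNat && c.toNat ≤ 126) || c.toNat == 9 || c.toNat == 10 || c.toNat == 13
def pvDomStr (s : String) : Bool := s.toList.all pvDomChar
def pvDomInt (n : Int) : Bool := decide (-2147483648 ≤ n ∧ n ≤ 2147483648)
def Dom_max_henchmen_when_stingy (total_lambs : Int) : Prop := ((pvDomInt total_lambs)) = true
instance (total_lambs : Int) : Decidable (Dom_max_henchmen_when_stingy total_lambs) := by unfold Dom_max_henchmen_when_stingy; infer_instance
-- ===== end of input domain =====

-- B replaces A's list of past costs and running remaining budget by two scalar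
-- Fibonacci variables compared against the fixed bound total_lambs+1 (objective: simpler).

-- ===== PORT A =====
-- A's while loop, fuel-bounded for totality (fuel only guards termination: it is
-- total_lambs.toNat + 1, enough because each iteration removes curr_cost ≥ 1 lambs).
-- henchmen[-1] / henchmen[-2] are taken with pyGet?; the .getD 0 default is never
-- used: the branch runs only when the appended list has length ≠ 1, hence ≥ 2.
def loopA : Nat → Int → Int → List Int → List Int
  | 0, _, _, henchmen => henchmen
  | fuel + 1, total_lambs, curr_cost, henchmen =>
    if curr_cost ≤ total_lambs then
      let henchmen' := henchmen ++ [curr_cost]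
      let curr_cost' :=
        if henchmen'.length ≠ 1 then
          (PySem.List.pyGet? henchmen' (-1)).getD 0 + (PySem.List.pyGet? henchmen' (-2)).getD 0
        else curr_cost
      loopA fuel (total_lambs - curr_cost) curr_cost' henchmen'
    else henchmen

def max_henchmen_when_stingy (total_lambs : Int) : Int :=
  ((loopA (total_lambs.toNat + 1) total_lambs 1 []).length : Int)

-- ===== PORT B =====
-- Source B's while loop, fuel-bounded for totality (same fuel bound; each iteration
-- grows f2 by f1 ≥ 1 toward the fixed budget).
def loopB : Nat → Int → Int → Int → Int → Int
  | 0, _, _, _, count => count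
  | fuel + 1, budget, f1, f2, count =>
    if f2 ≤ budget then loopB fuel budget f2 (f1 + f2) (count + 1) else count

def max_henchmen_when_stingy_alt (total_lambs : Int) : Int :=
  loopB (total_lambs.toNat + 1) (total_lambs + 1) 1 2 0

-- ===== PRECONDITION & SPEC =====
def Spec_max_henchmen_when_stingy (total_lambs : Int) (out : Int) : Prop := out = max_henchmen_when_stingy_alt total_lambs
instance (total_lambs : Int) (out : Int) : Decidable (Spec_max_henchmen_when_stingy total_lambs out) := by unfold Spec_max_henchmen_when_stingy; infer_instance

-- ===== CLAIM (what is proved, stated in full; the proofs are below) =====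
def Claim_equal_max_henchmen_when_stingy : Prop := ∀ (total_lambs : Int), Dom_max_henchmen_when_stingy total_lambs → Spec_max_henchmen_when_stingy total_lambs (max_henchmen_when_stingy total_lambs)

-- ===== LEMMAS AND PROOFS =====

-- One steady-state iteration of A's loop: appending curr to a nonempty list r ++ [q]
-- triggers the len ≠ 1 branch, and henchmen[-1] + henchmen[-2] = curr + q.
theorem loopA_step (n : Nat) (t curr q : Int) (r : List Int) (hcond : curr ≤ t) :
    loopA (n + 1) t curr (r ++ [q])
      = loopA n (t - curr) (curr + q) ((r ++ [q]) ++ [curr]) := by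
  rw [loopA, if_pos hcond]
  have hlen : ((r ++ [q]) ++ [curr]).length ≠ 1 := by simp
  show loopA n (t - curr)
      (if ((r ++ [q]) ++ [curr]).length ≠ 1 then
        (PySem.List.pyGet? ((r ++ [q]) ++ [curr]) (-1)).getD 0
          + (PySem.List.pyGet? ((r ++ [q]) ++ [curr]) (-2)).getD 0
      else curr) ((r ++ [q]) ++ [curr]) = _
  rw [if_pos hlen]
  have hg1 : (PySem.List.pyGet? ((r ++ [q]) ++ [curr]) (-1)).getD 0 = curr := by
    rw [PySem.List.pyGet?_neg_one_append_singleton]; rfl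
  have hg2 : (PySem.List.pyGet? ((r ++ [q]) ++ [curr]) (-2)).getD 0 = q := by
    have h2 : (2 : Nat) ≤ ((r ++ [q]) ++ [curr]).length := by simp
    rw [PySem.List.pyGet?_neg_ofNat _ 2 (by omega) h2]
    have hl : ((r ++ [q]) ++ [curr]).length - 2 = r.length := by simp
    rw [hl, List.append_assoc]
    rw [List.getElem?_append_right (by omega : r.length ≤ r.length)]
    simp
  rw [hg1, hg2]

-- A's first iteration: the singleton list keeps curr_cost = 1.
theorem loopA_first (n : Nat) (t : Int) (h1 : 1 ≤ t) :
    loopA (n + 1) t 1 [] = loopA n (t - 1) 1 [1] := by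
  rw [loopA, if_pos h1]
  show loopA n (t - 1)
      (if ([1] : List Int).length ≠ 1 then
        (PySem.List.pyGet? ([1] : List Int) (-1)).getD 0
          + (PySem.List.pyGet? ([1] : List Int) (-2)).getD 0
      else 1) [1] = _
  rw [if_neg (by decide)]

-- Lock-step simulation past the first iteration: A's state (t, curr, r ++ [q])
-- with 1 ≤ q ≤ curr corresponds to B's state budget = t + curr + q,
-- f1 = curr + q, f2 = 2*curr + q; both loops then iterate in lock step.
theorem sim : ∀ (fuelA fuelB : Nat) (t curr q count : Int) (r : List Int),
    t.toNat < fuelA → t.toNat < fuelB → 1 ≤ q → q ≤ curr →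
    ((loopA fuelA t curr (r ++ [q])).length : Int) - (r.length + 1)
      = loopB fuelB (t + curr + q) (curr + q) (2 * curr + q) count - count := by
  intro fuelA
  induction fuelA with
  | zero => intro fuelB t curr q count r hA; omega
  | succ n ih =>
    intro fuelB t curr q count r hA hB hq hqc
    cases fuelB with
    | zero => omega
    | succ m =>
      by_cases hcond : curr ≤ t
      · rw [loopA_step n t curr q r hcond, loopB, if_pos (by omega)]
        have step := ih m (t - curr) (curr + q) curr (count + 1) (r ++ [q])
          (by omega) (by omega) (by omega) (by omega)
        rw [show t - curr + (curr + q) + curr = t + curr + q from by ring,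
            show curr + q + curr = 2 * curr + q from by ring,
            show 2 * (curr + q) + curr = curr + q + (2 * curr + q) from by ring] at step
        simp only [List.length_append, List.length_cons, List.length_nil] at step ⊢
        push_cast at step ⊢
        omega
      · rw [loopA, if_neg hcond, loopB, if_neg (by omega)]
        simp

theorem spec_all (total_lambs : Int) :
    max_henchmen_when_stingy total_lambs = max_henchmen_when_stingy_alt total_lambs := by
  unfold max_henchmen_when_stingy max_henchmen_when_stingy_alt
  by_cases h1 : 1 ≤ total_lambs
  · -- one iteration of each loop, then the lock-step simulation
    obtain ⟨k, hk⟩ : ∃ k, total_lambs.toNat + 1 = k + 2 :=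
      ⟨total_lambs.toNat - 1, by omega⟩
    rw [hk, loopA_first (k + 1) total_lambs h1, loopB, if_pos (by omega)]
    have step := sim (k + 1) (k + 1) (total_lambs - 1) 1 1 (0 + 1) []
      (by omega) (by omega) (by omega) (by omega)
    rw [show total_lambs - 1 + 1 + 1 = total_lambs + 1 from by ring] at step
    norm_num at step
    simpa using step
  · -- total_lambs ≤ 0: both loops exit at once
    have ht : total_lambs.toNat = 0 := by omega
    rw [ht, loopA, if_neg (by omega), loopB, if_neg (by omega)]
    simp

-- ===== VERDICT (by name: the statement is the Claim_ definition above) =====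
theorem max_henchmen_when_stingy_spec : Claim_equal_max_henchmen_when_stingy := by
  intro total_lambs _
  exact spec_all total_lambs
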